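-- pv_equiv track=rewrite | github.com/jjsandhu155/AI | U3_Turns/Ghost/ghost.py | max_move
-- ===== SOURCE A (Python) =====
-- alphabet = 'abcdefghijklmnopqrstuvwxyz'
--
-- def game_is_over(word, dictionary):
--     if word in dictionary:
--         return True
--     return False
--
-- def switch_player(player):
--     if player == '1':
--         return '2'
--     if player == '2':
--         return '1'
--
-- def score_board(word, player, dictionary):
--     if word in dictionary:
--         if player == '1':
--             return -1
--         if player == '2':
--             return 1
--     return 0
--
-- def next_possible_boards(word, dictionary):
--     possible_boards = []
--     for letter in alphabet:
--         temp = word + letter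
--         for d in dictionary:
--             if d.startswith(temp):
--                 possible_boards.append((temp, letter))
--                 break
--     return possible_boards, {d for d in dictionary if d.startswith(word)}
--
-- def min_step(board, dictionary, player):
--     if game_is_over(board, dictionary):
--         return score_board(board, player, dictionary)
--     results = []
--     moves, new_dictionary = next_possible_boards(board, dictionary)
--     if len(moves) == 0:
--         results.append(max_step(board, new_dictionary, switch_player(player)))
--     else:
--         for next_board in moves:
--             results.append(max_step(next_board[0], new_dictionary, switch_player(player)))
--     return min(results)
--
-- def max_step(board, dictionary, player):
--     if game_is_over(board, dictionary):
--         return score_board(board, player, dictionary)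
--     results = []
--     moves, new_dictionary = next_possible_boards(board, dictionary)
--     if len(moves) == 0:
--         results.append(min_step(board, new_dictionary, switch_player(player)))
--     else:
--         for next_board in moves:
--             results.append(min_step(next_board[0], new_dictionary, switch_player(player)))
--     return max(results)
--
-- def max_move(board, dictionary, player):
--     if game_is_over(board, dictionary):
--         return score_board(board, player, dictionary)
--     results = []
--     moves, new_dictionary = next_possible_boards(board, dictionary)
--     for next_board in moves:
--         results.append((min_step(next_board[0], new_dictionary, switch_player(player)), next_board[1]))
--     return [move for value, move in results if value == 1]
-- ===== SOURCE B (Python) =====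
-- alphabet = 'abcdefghijklmnopqrstuvwxyz'
--
--
-- def _switch(player):
--     if player == '1':
--         return '2'
--     if player == '2':
--         return '1'
--     return None
--
--
-- def _solve(suffixes, player, minimizing):
--     # game value of the position whose remaining word-suffixes are `suffixes`
--     if '' in suffixes:
--         return -1 if player == '1' else (1 if player == '2' else 0)
--     nxt = _switch(player)
--     vals = []
--     for c in alphabet:
--         child = [s[1:] for s in suffixes if s.startswith(c)]
--         if child:
--             vals.append(_solve(child, nxt, not minimizing))
--     if not vals:
--         return 0
--     return min(vals) if minimizing else max(vals)
--
--
-- def max_move(board, dictionary, player):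
--     suffixes = [w[len(board):] for w in dictionary if w.startswith(board)]
--     if '' in suffixes:
--         return []
--     nxt = _switch(player)
--     res = []
--     for c in alphabet:
--         child = [s[1:] for s in suffixes if s.startswith(c)]
--         if child and _solve(child, nxt, True) == 1:
--             res.append(c)
--     return res
-- ===== Notes on version B (the rewrite author's own statement) =====
-- stated objective: faster
-- what changed: Replaces the mutual min/max recursion that rescans the whole dictionary with startswith against an ever-growing prefix at every node by a single negamax-style recursion over the lists of word suffixes below the current node, filtered one leading character at a time.
-- outside the precondition, e.g. on max_move('ab', {'ab'}, '1'): A returns -1, B returns []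
import Mathlib
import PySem

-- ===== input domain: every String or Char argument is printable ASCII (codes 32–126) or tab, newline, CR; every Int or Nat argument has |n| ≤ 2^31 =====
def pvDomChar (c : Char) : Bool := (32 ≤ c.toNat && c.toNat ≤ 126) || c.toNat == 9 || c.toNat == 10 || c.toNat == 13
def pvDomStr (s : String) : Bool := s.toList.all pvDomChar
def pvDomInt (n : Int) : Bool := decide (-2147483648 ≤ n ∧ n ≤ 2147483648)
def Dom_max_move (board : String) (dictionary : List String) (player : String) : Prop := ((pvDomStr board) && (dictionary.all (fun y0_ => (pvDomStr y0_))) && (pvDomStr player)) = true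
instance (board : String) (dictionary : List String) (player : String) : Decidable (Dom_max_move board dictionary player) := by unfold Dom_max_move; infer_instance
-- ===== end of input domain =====

-- B replaces A's per-node rescans of the whole dictionary (startswith against an ever-growing
-- prefix, in a mutual min/max recursion) by a single negamax-style recursion on the lists of
-- word SUFFIXES below the current node, filtered one first-character at a time (objective: faster).

-- ===== PORT A =====
-- strings are handled as their character lists (String.toList) throughout both ports
def pvAlphabet : List Char :=
  ['a','b','c','d','e','f','g','h','i','j','k','l','m',
   'n','o','p','q','r','s','t','u','v','w','x','y','z']

def pvGameOver (w : List Char) (D : List (List Char)) : Bool := w ∈ D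

def pvScore (w : List Char) (player : String) (D : List (List Char)) : Int :=
  if w ∈ D then (if player = "1" then -1 else if player = "2" then 1 else 0) else 0

-- Python's switch_player returns None on any other input; None is only ever compared
-- (un)equal to '1'/'2' downstream, exactly as "" is, so "" models None exactly here.
def pvSwitch (player : String) : String :=
  if player = "1" then "2" else if player = "2" then "1" else ""

-- Python's inner 'for d in dictionary: if d.startswith(temp): append((temp, letter)); break'
-- appends exactly once iff some d starts with temp, i.e. List.any.
def pvMoves (w : List Char) (D : List (List Char)) : List (List Char × Char) :=
  pvAlphabet.foldl (fun acc c =>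
    if D.any (fun d => PySem.Chars.startswith d (w ++ [c])) then acc ++ [(w ++ [c], c)] else acc) []

-- the set comprehension {d for d in dictionary if d.startswith(word)}
def pvNewDict (w : List Char) (D : List (List Char)) : List (List Char) :=
  PySem.Set.ofList (D.filter (fun d => PySem.Chars.startswith d w))

-- fuel: a totality guard only; the recursion deepens the board by one character per level
def pvFuel (D : List (List Char)) : Nat := 1 + (D.map List.length).sum

mutual
def pvMinStep : Nat → List Char → List (List Char) → String → Int
  | 0, _, _, _ => 0
  | f+1, b, D, p =>
    if pvGameOver b D then pvScore b p D
    else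
      let moves := pvMoves b D
      let D' := pvNewDict b D
      let results := if moves = [] then [pvMaxStep f b D' (pvSwitch p)]
                     else moves.map (fun nb => pvMaxStep f nb.1 D' (pvSwitch p))
      -- results is nonempty by construction, so Python's min(results) never sees []
      (PySem.List.min? results (fun v => v)).getD 0

def pvMaxStep : Nat → List Char → List (List Char) → String → Int
  | 0, _, _, _ => 0
  | f+1, b, D, p =>
    if pvGameOver b D then pvScore b p D
    else
      let moves := pvMoves b D
      let D' := pvNewDict b D
      let results := if moves = [] then [pvMinStep f b D' (pvSwitch p)]
                     else moves.map (fun nb => pvMinStep f nb.1 D' (pvSwitch p))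
      (PySem.List.max? results (fun v => v)).getD 0
end

def max_move (board : String) (dictionary : List String) (player : String) : List String :=
  let b := board.toList
  let D := dictionary.map (fun w => w.toList)
  -- Python returns the integer score here (not a list of strings); Pre_max_move excludes board ∈ dictionary
  if pvGameOver b D then []
  else
    let moves := pvMoves b D
    let D' := pvNewDict b D
    let results := moves.map (fun nb => (pvMinStep (pvFuel D) nb.1 D' (pvSwitch player), nb.2))
    (results.filterMap (fun vm => if vm.1 = 1 then some vm.2 else none)).map (fun c => String.ofList [c])

-- ===== PORT B =====
-- Source B's _switch has the same body as A's switch_player and is ported by the shared pvSwitch;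
-- Source B's module-level alphabet is the shared pvAlphabet; its fuel guard is the shared pvFuel.

-- [s[1:] for s in suffixes if s.startswith(c)]
def pvChild (c : Char) (S : List (List Char)) : List (List Char) :=
  S.filterMap (fun s => if PySem.Chars.startswith s [c] then some (PySem.List.slice s (some 1) none) else none)

def pvSolve : Nat → List (List Char) → String → Bool → Int
  | 0, _, _, _ => 0
  | f+1, S, p, minimizing =>
    if ([] : List Char) ∈ S then (if p = "1" then -1 else if p = "2" then 1 else 0)
    else
      let nxt := pvSwitch p
      let vals := pvAlphabet.foldl (fun acc c =>
        if !(pvChild c S).isEmpty then acc ++ [pvSolve f (pvChild c S) nxt (!minimizing)] else acc) []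
      if vals = [] then 0
      else if minimizing then (PySem.List.min? vals (fun v => v)).getD 0
      else (PySem.List.max? vals (fun v => v)).getD 0

-- [w[len(board):] for w in dictionary if w.startswith(board)]
def pvSuffixes (b : List Char) (D : List (List Char)) : List (List Char) :=
  D.filterMap (fun w => if PySem.Chars.startswith w b then some (PySem.List.slice w (some (b.length : Int)) none) else none)

def max_move_alt (board : String) (dictionary : List String) (player : String) : List String :=
  let b := board.toList
  let D := dictionary.map (fun w => w.toList)
  let S := pvSuffixes b D
  if ([] : List Char) ∈ S then []
  else
    let nxt := pvSwitch player
    (pvAlphabet.foldl (fun acc c =>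
      if !(pvChild c S).isEmpty && (pvSolve (pvFuel D) (pvChild c S) nxt true == 1) then acc ++ [c] else acc) []).map
      (fun c => String.ofList [c])

-- ===== PRECONDITION & SPEC =====
def pvIsLower (c : Char) : Bool := 97 ≤ c.toNat && c.toNat ≤ 122

-- the "no reachable dead end" condition: every game position strictly below the board that the
-- exploration reaches (a proper prefix w[:j] of a word, reached through lowercase letters, with
-- no completed word strictly in between) must either be a word itself or extend by a lowercase
-- letter of some word — otherwise Python A recurses forever (RecursionError).
abbrev pvNoDeadEnd (board : String) (dictionary : List String) : Prop :=
  ∀ w ∈ dictionary, ∀ j : Nat, j < w.toList.length →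
    board.toList.length < j →
    board.toList.IsPrefix w.toList →
    ((w.toList.drop board.toList.length).take (j - board.toList.length)).all pvIsLower = true →
    (∀ k : Nat, k < j + 1 → board.toList.length < k → ¬ ∃ u ∈ dictionary, u.toList = w.toList.take k) →
    ∃ u ∈ dictionary, (w.toList.take j).IsPrefix u.toList ∧ j < u.toList.length ∧ pvIsLower (u.toList.getD j ' ') = true

-- Pre_ excludes (a) board ∈ dictionary, where Python A returns an integer score instead of a list,
-- and (b) dictionaries with a reachable dead-end prefix, where Python A raises RecursionError.
def Pre_max_move (board : String) (dictionary : List String) (player : String) : Prop :=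
  board ∉ dictionary ∧ pvNoDeadEnd board dictionary

instance (board : String) (dictionary : List String) (player : String) : Decidable (Pre_max_move board dictionary player) := by
  unfold Pre_max_move; infer_instance

def pvWitness_max_move : String × List String × String := ("", ["cab", "cat"], "1")

def Spec_max_move (board : String) (dictionary : List String) (player : String) (out : List String) : Prop := out = max_move_alt board dictionary player
instance (board : String) (dictionary : List String) (player : String) (out : List String) : Decidable (Spec_max_move board dictionary player out) := by unfold Spec_max_move; infer_instance

-- ===== CLAIM (what is proved, stated in full; the proofs are below) =====
def Claim_equal_max_move : Prop := ∀ (board : String) (dictionary : List String) (player : String), Dom_max_move board dictionary player → Pre_max_move board dictionary player → Spec_max_move board dictionary player (max_move board dictionary player)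


-- ===== LEMMAS AND PROOFS =====

-- membership characterisations
theorem pv_mem_suffixes (b : List Char) (D : List (List Char)) (x : List Char) :
    x ∈ pvSuffixes b D ↔ (b ++ x) ∈ D := by
  unfold pvSuffixes
  rw [List.mem_filterMap]
  constructor
  · rintro ⟨w, hw, h⟩
    by_cases hs : PySem.Chars.startswith w b
    · simp only [hs, if_pos] at h
      obtain ⟨t, rfl⟩ := (PySem.Chars.startswith_iff w b).1 hs
      have : PySem.List.slice (b ++ t) (some (b.length : Int)) none = t := by
        have := PySem.List.slice_from_natCast (b ++ t) b.length
        simpa [List.drop_left] using this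
      rw [this] at h
      cases h
      simpa using hw
    · simp [hs] at h
  · intro h
    refine ⟨b ++ x, h, ?_⟩
    have hs : PySem.Chars.startswith (b ++ x) b = true :=
      (PySem.Chars.startswith_iff _ _).2 ⟨x, rfl⟩
    have := PySem.List.slice_from_natCast (b ++ x) b.length
    simp [hs, this, List.drop_left]

theorem pv_mem_child (c : Char) (S : List (List Char)) (x : List Char) :
    x ∈ pvChild c S ↔ (c :: x) ∈ S := by
  unfold pvChild
  rw [List.mem_filterMap]
  constructor
  · rintro ⟨s, hs, h⟩
    by_cases hp : PySem.Chars.startswith s [c]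
    · simp only [hp, if_pos] at h
      obtain ⟨t, rfl⟩ := (PySem.Chars.startswith_iff s [c]).1 hp
      rw [PySem.List.slice_from_one] at h
      cases h
      simpa using hs
    · simp [hp] at h
  · intro h
    refine ⟨c :: x, h, ?_⟩
    have hp : PySem.Chars.startswith (c :: x) [c] = true :=
      (PySem.Chars.startswith_iff _ _).2 ⟨x, rfl⟩
    simp [hp, PySem.List.slice_from_one]

theorem pv_mem_newDict (b : List Char) (D : List (List Char)) (w : List Char) :
    w ∈ pvNewDict b D ↔ w ∈ D ∧ b <+: w := by
  unfold pvNewDict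
  rw [PySem.Set.mem_ofList, List.mem_filter]
  simp [PySem.Chars.startswith_iff]

theorem pv_gameOver_iff (b : List Char) (D : List (List Char)) :
    pvGameOver b D = true ↔ ([] : List Char) ∈ pvSuffixes b D := by
  rw [pv_mem_suffixes]
  simp [pvGameOver]

theorem pv_moves_eq (b : List Char) (D : List (List Char)) :
    pvMoves b D = (pvAlphabet.filter (fun c => D.any (fun d => PySem.Chars.startswith d (b ++ [c])))).map
      (fun c => (b ++ [c], c)) := by
  unfold pvMoves
  simpa using PySem.List.foldl_append_if
    (fun c => D.any (fun d => PySem.Chars.startswith d (b ++ [c]))) (fun c => (b ++ [c], c)) pvAlphabet []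

theorem pv_guard_iff (b : List Char) (D : List (List Char)) (c : Char) :
    D.any (fun d => PySem.Chars.startswith d (b ++ [c])) = !(pvChild c (pvSuffixes b D)).isEmpty := by
  rw [Bool.eq_iff_iff]
  simp only [List.any_eq_true, Bool.not_eq_true', List.isEmpty_iff, Bool.not_eq_true,
    List.isEmpty_eq_false_iff_exists_mem]
  constructor
  · rintro ⟨d, hd, hs⟩
    obtain ⟨t, rfl⟩ := (PySem.Chars.startswith_iff _ _).1 hs
    exact ⟨t, (pv_mem_child _ _ _).2 ((pv_mem_suffixes _ _ _).2 (by simpa using hd))⟩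
  · rintro ⟨x, hx⟩
    have := (pv_mem_suffixes _ _ _).1 ((pv_mem_child _ _ _).1 hx)
    exact ⟨b ++ c :: x, this, (PySem.Chars.startswith_iff _ _).2 ⟨x, by simp⟩⟩

theorem pv_child_newDict (b : List Char) (D : List (List Char)) (c : Char) (x : List Char) :
    x ∈ pvSuffixes (b ++ [c]) (pvNewDict b D) ↔ x ∈ pvChild c (pvSuffixes b D) := by
  rw [pv_mem_suffixes, pv_mem_newDict, pv_mem_child, pv_mem_suffixes]
  constructor
  · rintro ⟨h, -⟩; simpa using h
  · intro h
    exact ⟨by simpa using h, ⟨c :: x, by simp⟩⟩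

-- pvSolve only depends on the SET of suffixes
theorem pv_solve_ext : ∀ (f : Nat) (S S' : List (List Char)) (p : String) (m : Bool),
    (∀ x, x ∈ S ↔ x ∈ S') → pvSolve f S p m = pvSolve f S' p m := by
  intro f
  induction f with
  | zero => intro S S' p m h; rfl
  | succ f ih =>
    intro S S' p m h
    simp only [pvSolve]
    by_cases hn : ([] : List Char) ∈ S
    · have hn' := (h []).1 hn
      simp [hn, hn']
    · have hn' : ([] : List Char) ∉ S' := fun x => hn ((h []).2 x)
      rw [if_neg hn, if_neg hn']
      have hfil : pvAlphabet.filter (fun c => !(pvChild c S).isEmpty)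
          = pvAlphabet.filter (fun c => !(pvChild c S').isEmpty) := by
        apply List.filter_congr
        intro c _
        have : (pvChild c S).isEmpty = (pvChild c S').isEmpty := by
          rw [Bool.eq_iff_iff]
          simp only [List.isEmpty_iff, List.eq_nil_iff_forall_not_mem]
          constructor
          · intro hS x hx
            exact hS x ((pv_mem_child c S x).2 ((h _).2 ((pv_mem_child c S' x).1 hx)))
          · intro hS x hx
            exact hS x ((pv_mem_child c S' x).2 ((h _).1 ((pv_mem_child c S x).1 hx)))
        rw [this]
      rw [PySem.List.foldl_append_if (fun c => !(pvChild c S).isEmpty)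
            (fun c => pvSolve f (pvChild c S) (pvSwitch p) (!m)) pvAlphabet [],
          PySem.List.foldl_append_if (fun c => !(pvChild c S').isEmpty)
            (fun c => pvSolve f (pvChild c S') (pvSwitch p) (!m)) pvAlphabet []]
      have hmap : (pvAlphabet.filter (fun c => !(pvChild c S).isEmpty)).map
            (fun c => pvSolve f (pvChild c S) (pvSwitch p) (!m))
          = (pvAlphabet.filter (fun c => !(pvChild c S').isEmpty)).map
            (fun c => pvSolve f (pvChild c S') (pvSwitch p) (!m)) := by
        rw [hfil]
        apply List.map_congr_left
        intro c _
        apply ih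
        intro x
        rw [pv_mem_child, pv_mem_child]
        exact h (c :: x)
      simp only [List.nil_append]
      rw [hmap]

-- a dead-end position loops through singleton result lists down to the fuel-0 value 0
theorem pv_stuck : ∀ (f : Nat) (b : List Char) (D : List (List Char)) (p : String),
    pvGameOver b D = false → pvMoves b D = [] →
    pvMinStep f b D p = 0 ∧ pvMaxStep f b D p = 0 := by
  intro f
  induction f with
  | zero => intro b D p _ _; exact ⟨rfl, rfl⟩
  | succ f ih =>
    intro b D p hGO hM
    have hbD : b ∉ D := by simpa [pvGameOver] using hGO
    have hGO' : pvGameOver b (pvNewDict b D) = false := by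
      simp only [pvGameOver, decide_eq_false_iff_not]
      intro hmem
      exact hbD ((pv_mem_newDict b D b).1 hmem).1
    have hM' : pvMoves b (pvNewDict b D) = [] := by
      rw [pv_moves_eq] at hM ⊢
      rw [List.map_eq_nil_iff] at hM ⊢
      rw [List.filter_eq_nil_iff] at hM ⊢
      intro c hc
      simp only [Bool.not_eq_true, List.any_eq_false] at hM ⊢
      intro d hd
      exact hM c hc d ((pv_mem_newDict b D d).1 hd).1
    have hrec := ih b (pvNewDict b D) (pvSwitch p) hGO' hM'
    constructor
    · simp only [pvMinStep, hGO, Bool.false_eq_true, if_false, hM, if_pos]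
      simp [PySem.List.min?, hrec.2]
    · simp only [pvMaxStep, hGO, Bool.false_eq_true, if_false, hM, if_pos]
      simp [PySem.List.max?, hrec.1]

-- the main correspondence, fuel to fuel
theorem pv_main : ∀ (f : Nat) (b : List Char) (D : List (List Char)) (p : String),
    pvMinStep f b D p = pvSolve f (pvSuffixes b D) p true ∧
    pvMaxStep f b D p = pvSolve f (pvSuffixes b D) p false := by
  intro f
  induction f with
  | zero => intro b D p; exact ⟨rfl, rfl⟩
  | succ f ih =>
    intro b D p
    by_cases hGO : pvGameOver b D = true
    · have hS : ([] : List Char) ∈ pvSuffixes b D := (pv_gameOver_iff b D).1 hGO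
      have hbD : b ∈ D := by simpa [pvGameOver] using hGO
      constructor <;>
        simp [pvMinStep, pvMaxStep, pvSolve, hGO, hS, pvScore, hbD]
    · have hGO' : pvGameOver b D = false := by simpa using hGO
      have hS : ([] : List Char) ∉ pvSuffixes b D := fun hs => hGO ((pv_gameOver_iff b D).2 hs)
      have hPQ : ∀ c ∈ pvAlphabet,
          (D.any (fun d => PySem.Chars.startswith d (b ++ [c])))
            = !(pvChild c (pvSuffixes b D)).isEmpty := fun c _ => pv_guard_iff b D c
      have hfilPQ : pvAlphabet.filter (fun c => D.any (fun d => PySem.Chars.startswith d (b ++ [c])))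
          = pvAlphabet.filter (fun c => !(pvChild c (pvSuffixes b D)).isEmpty) :=
        List.filter_congr hPQ
      by_cases hE : pvAlphabet.filter (fun c => !(pvChild c (pvSuffixes b D)).isEmpty) = []
      · have hM : pvMoves b D = [] := by
          rw [pv_moves_eq, hfilPQ, hE]; rfl
        have hstuck := pv_stuck (f + 1) b D p hGO' hM
        have hB : pvSolve (f + 1) (pvSuffixes b D) p true = 0 ∧
            pvSolve (f + 1) (pvSuffixes b D) p false = 0 := by
          constructor <;>
          · simp only [pvSolve, hS, if_neg, if_false]
            rw [PySem.List.foldl_append_if (fun c => !(pvChild c (pvSuffixes b D)).isEmpty) _ pvAlphabet []]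
            simp [hE]
        exact ⟨by rw [hstuck.1, hB.1], by rw [hstuck.2, hB.2]⟩
      · have hM : pvMoves b D
            = (pvAlphabet.filter (fun c => !(pvChild c (pvSuffixes b D)).isEmpty)).map
                (fun c => (b ++ [c], c)) := by rw [pv_moves_eq, hfilPQ]
        have hMne : pvMoves b D ≠ [] := by
          rw [hM]; simpa using hE
        have hchild : ∀ c q m, pvSolve f (pvSuffixes (b ++ [c]) (pvNewDict b D)) q m
            = pvSolve f (pvChild c (pvSuffixes b D)) q m := by
          intro c q m
          exact pv_solve_ext f _ _ q m (pv_child_newDict b D c)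
        have hptMin : ∀ c, pvMaxStep f (b ++ [c]) (pvNewDict b D) (pvSwitch p)
            = pvSolve f (pvChild c (pvSuffixes b D)) (pvSwitch p) false := by
          intro c
          rw [(ih (b ++ [c]) (pvNewDict b D) (pvSwitch p)).2, hchild]
        have hptMax : ∀ c, pvMinStep f (b ++ [c]) (pvNewDict b D) (pvSwitch p)
            = pvSolve f (pvChild c (pvSuffixes b D)) (pvSwitch p) true := by
          intro c
          rw [(ih (b ++ [c]) (pvNewDict b D) (pvSwitch p)).1, hchild]
        have hLmin : List.map ((fun nb : List Char × Char => pvMaxStep f nb.1 (pvNewDict b D) (pvSwitch p)) ∘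
              (fun c => (b ++ [c], c))) (pvAlphabet.filter (fun c => !(pvChild c (pvSuffixes b D)).isEmpty))
            = List.map (fun c => pvSolve f (pvChild c (pvSuffixes b D)) (pvSwitch p) (!true))
              (pvAlphabet.filter (fun c => !(pvChild c (pvSuffixes b D)).isEmpty)) :=
          List.map_congr_left (fun c _ => hptMin c)
        have hLmax : List.map ((fun nb : List Char × Char => pvMinStep f nb.1 (pvNewDict b D) (pvSwitch p)) ∘
              (fun c => (b ++ [c], c))) (pvAlphabet.filter (fun c => !(pvChild c (pvSuffixes b D)).isEmpty))
            = List.map (fun c => pvSolve f (pvChild c (pvSuffixes b D)) (pvSwitch p) (!false))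
              (pvAlphabet.filter (fun c => !(pvChild c (pvSuffixes b D)).isEmpty)) :=
          List.map_congr_left (fun c _ => hptMax c)
        constructor
        · simp only [pvMinStep, pvSolve, hGO', Bool.false_eq_true, if_false, hS, if_neg, hMne]
          rw [PySem.List.foldl_append_if (fun c => !(pvChild c (pvSuffixes b D)).isEmpty)
                (fun c => pvSolve f (pvChild c (pvSuffixes b D)) (pvSwitch p) (!true)) pvAlphabet []]
          simp only [List.nil_append, hM, List.map_map]
          rw [hLmin]
          simp [List.map_eq_nil_iff, hE]
        · simp only [pvMaxStep, pvSolve, hGO', Bool.false_eq_true, if_false, hS, if_neg, hMne]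
          rw [PySem.List.foldl_append_if (fun c => !(pvChild c (pvSuffixes b D)).isEmpty)
                (fun c => pvSolve f (pvChild c (pvSuffixes b D)) (pvSwitch p) (!false)) pvAlphabet []]
          simp only [List.nil_append, hM, List.map_map]
          rw [hLmax]
          simp [List.map_eq_nil_iff, hE]

-- filtering an if-guard that keeps the element itself is List.filter
theorem pv_filterMap_guard {q : Char → Prop} [DecidablePred q] (l : List Char) :
    l.filterMap (fun c => if q c then some c else none) = l.filter (fun c => decide (q c)) := by
  induction l with
  | nil => rfl
  | cons x xs ihx =>
    by_cases hx : q x <;> simp [hx, ihx]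

-- ===== VERDICT (by name: the statement is the Claim_ definition above) =====
theorem max_move_spec : Claim_equal_max_move := by
  intro board dictionary player _ _
  unfold Spec_max_move max_move max_move_alt
  set b := board.toList with hb
  set D := dictionary.map (fun w => w.toList) with hD
  by_cases hGO : pvGameOver b D = true
  · have hS : ([] : List Char) ∈ pvSuffixes b D := (pv_gameOver_iff b D).1 hGO
    simp [hGO, hS]
  · have hGO' : pvGameOver b D = false := by simpa using hGO
    have hS : ([] : List Char) ∉ pvSuffixes b D := fun hs => hGO ((pv_gameOver_iff b D).2 hs)
    have key : ((pvMoves b D).map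
          (fun nb => (pvMinStep (pvFuel D) nb.1 (pvNewDict b D) (pvSwitch player), nb.2))).filterMap
            (fun vm => if vm.1 = 1 then some vm.2 else none)
        = pvAlphabet.foldl (fun acc c =>
            if !(pvChild c (pvSuffixes b D)).isEmpty
                && (pvSolve (pvFuel D) (pvChild c (pvSuffixes b D)) (pvSwitch player) true == 1)
              then acc ++ [c] else acc) [] := by
      rw [PySem.List.foldl_append_if
            (fun c => !(pvChild c (pvSuffixes b D)).isEmpty
              && (pvSolve (pvFuel D) (pvChild c (pvSuffixes b D)) (pvSwitch player) true == 1))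
            (fun c => c) pvAlphabet []]
      rw [pv_moves_eq b D, List.map_map, List.filterMap_map]
      have comp : ((fun vm : Int × Char => if vm.1 = 1 then some vm.2 else none) ∘
            ((fun nb : List Char × Char => (pvMinStep (pvFuel D) nb.1 (pvNewDict b D) (pvSwitch player), nb.2)) ∘
              (fun c => (b ++ [c], c))))
          = fun c => if pvMinStep (pvFuel D) (b ++ [c]) (pvNewDict b D) (pvSwitch player) = 1
              then some c else none := rfl
      rw [comp, pv_filterMap_guard
            (q := fun c => pvMinStep (pvFuel D) (b ++ [c]) (pvNewDict b D) (pvSwitch player) = 1),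
          List.filter_filter]
      simp only [List.nil_append, List.map_id']
      apply List.filter_congr
      intro c _
      have hP := pv_guard_iff b D c
      have hV : pvMinStep (pvFuel D) (b ++ [c]) (pvNewDict b D) (pvSwitch player)
          = pvSolve (pvFuel D) (pvChild c (pvSuffixes b D)) (pvSwitch player) true := by
        have h1 := (pv_main (pvFuel D) (b ++ [c]) (pvNewDict b D) (pvSwitch player)).1
        rw [h1]
        have h2 := pv_solve_ext (pvFuel D) _ _ (pvSwitch player) true (pv_child_newDict b D c)
        rw [h2]
      rw [hP, hV, Bool.eq_iff_iff]
      simp only [Bool.and_eq_true, decide_eq_true_eq, beq_iff_eq]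
      tauto
    simp only [hGO', Bool.false_eq_true, if_false, hS, if_neg]
    rw [key]
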